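-- pv_equiv track=rewrite | github.com/wyuquane/coding | homework.py | group_sum5
-- ===== SOURCE A (Python) =====
-- def group_sum5(start: int, nums: list, target: int):
--     if start >= len(nums):
--         return target == 0
--     if start == len(nums) - 1 and nums[start] == 5:
--         return target == 5
--
--     if nums[start] == 5:
--         if nums[start + 1] != 1:
--             return group_sum5(start + 1, nums, target - 5)
--         return group_sum5(start + 1, nums, target)
--
--     return (group_sum5(start + 1, nums, target - nums[start])
--             or group_sum5(start + 1, nums, target))
-- ===== SOURCE B (Python) =====
-- def group_sum5(start: int, nums: list, target: int):
--     # Top-down dynamic programming: the take/skip recursion memoized on (s, t).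
--     memo = {}
--
--     def go(s, t):
--         if s >= len(nums):
--             return t == 0
--         key = (s, t)
--         if key in memo:
--             return memo[key]
--         v = nums[s]
--         if s == len(nums) - 1 and v == 5:
--             r = t == 5
--         elif v == 5:
--             r = go(s + 1, t - 5 if nums[s + 1] != 1 else t)
--         else:
--             r = go(s + 1, t - v) or go(s + 1, t)
--         memo[key] = r
--         return r
--
--     return go(start, target)
-- ===== Notes on version B (the rewrite author's own statement) =====
-- stated objective: alternative
-- what changed: A's naive take/skip recursion becomes top-down dynamic programming: each subproblem (s, t) is solved once and cached in a dict, so overlapping branches collapse into lookups; Pre_ only excludes start < -len(nums), where both A and B raise IndexError.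
import Mathlib
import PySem

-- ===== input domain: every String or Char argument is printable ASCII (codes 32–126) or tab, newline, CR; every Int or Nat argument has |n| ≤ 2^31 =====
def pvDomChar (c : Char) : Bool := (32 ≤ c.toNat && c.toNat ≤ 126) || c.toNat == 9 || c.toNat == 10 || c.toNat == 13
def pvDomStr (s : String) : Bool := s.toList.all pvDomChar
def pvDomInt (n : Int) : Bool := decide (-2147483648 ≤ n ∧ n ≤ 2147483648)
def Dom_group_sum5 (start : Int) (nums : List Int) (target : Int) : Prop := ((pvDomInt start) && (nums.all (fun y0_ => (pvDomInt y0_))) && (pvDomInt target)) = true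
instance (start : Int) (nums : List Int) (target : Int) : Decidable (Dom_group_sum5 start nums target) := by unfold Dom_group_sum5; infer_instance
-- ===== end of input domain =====

-- B replaces A's naive take/skip recursion by top-down dynamic programming: the recursion
-- memoized on (s, t), each subproblem solved once and cached in a dict.

-- ===== PORT A =====
def group_sum5 (start : Int) (nums : List Int) (target : Int) : Bool :=
  if _h : start ≥ (nums.length : Int) then target == 0
  else
    match PySem.List.pyGet? nums start with
    | none => false   -- Python raises IndexError here; excluded by Pre_
    | some v =>
      if start == (nums.length : Int) - 1 && v == 5 then target == 5
      else if v == 5 then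
        match PySem.List.pyGet? nums (start + 1) with
        | none => false   -- unreachable once nums[start] succeeded
        | some w =>
          if w != 1 then group_sum5 (start + 1) nums (target - 5)
          else group_sum5 (start + 1) nums target
      else group_sum5 (start + 1) nums (target - v) || group_sum5 (start + 1) nums target
termination_by ((nums.length : Int) - start).toNat
decreasing_by all_goals omega

-- ===== PORT B =====
-- Source B's inner 'go', with the memo dict threaded through explicitly.
def goB (nums : List Int) (s : Int) (t : Int) (memo : PySem.Dict (Int × Int) Bool) :
    Bool × PySem.Dict (Int × Int) Bool :=
  if _h : s ≥ (nums.length : Int) then (t == 0, memo)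
  else
    match memo.get? (s, t) with
    | some r => (r, memo)
    | none =>
      match PySem.List.pyGet? nums s with
      | none => (false, memo)   -- Python raises IndexError here; excluded by Pre_
      | some v =>
        let r :=
          if s == (nums.length : Int) - 1 && v == 5 then (t == 5, memo)
          else if v == 5 then
            match PySem.List.pyGet? nums (s + 1) with
            | none => (false, memo)   -- unreachable once nums[s] succeeded
            | some w => goB nums (s + 1) (if w != 1 then t - 5 else t) memo
          else
            match goB nums (s + 1) (t - v) memo with
            | (true, m1) => (true, m1)
            | (false, m1) => goB nums (s + 1) t m1
        (r.1, r.2.insert (s, t) r.1)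
termination_by ((nums.length : Int) - s).toNat
decreasing_by all_goals omega

def group_sum5_alt (start : Int) (nums : List Int) (target : Int) : Bool :=
  (goB nums start target PySem.Dict.empty).1

-- ===== PRECONDITION & SPEC =====
-- Pre_ excludes exactly the inputs where the Python A (and B alike) raises IndexError:
-- start < -len(nums), the first access nums[start] being out of range.
def Pre_group_sum5 (start : Int) (nums : List Int) (target : Int) : Prop :=
  -(nums.length : Int) ≤ start
instance (start : Int) (nums : List Int) (target : Int) : Decidable (Pre_group_sum5 start nums target) := by unfold Pre_group_sum5; infer_instance
def pvWitness_group_sum5 : Int × List Int × Int := (0, [5, 1, 2], 3)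

def Spec_group_sum5 (start : Int) (nums : List Int) (target : Int) (out : Bool) : Prop := out = group_sum5_alt start nums target
instance (start : Int) (nums : List Int) (target : Int) (out : Bool) : Decidable (Spec_group_sum5 start nums target out) := by unfold Spec_group_sum5; infer_instance

-- ===== CLAIM (what is proved, stated in full; the proofs are below) =====
def Claim_equal_group_sum5 : Prop := ∀ (start : Int) (nums : List Int) (target : Int), Dom_group_sum5 start nums target → Pre_group_sum5 start nums target → Spec_group_sum5 start nums target (group_sum5 start nums target)

-- ===== LEMMAS AND PROOFS =====

-- memo invariant: every cached value is A's value for its key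
def MemoOK (nums : List Int) (memo : PySem.Dict (Int × Int) Bool) : Prop :=
  ∀ (s t : Int) (r : Bool), memo.get? (s, t) = some r → r = group_sum5 s nums t

lemma memoOK_empty (nums : List Int) : MemoOK nums PySem.Dict.empty := by
  intro s t r h
  simp [PySem.Dict.get?_empty] at h

lemma memoOK_insert (nums : List Int) (memo : PySem.Dict (Int × Int) Bool)
    (hm : MemoOK nums memo) (s t : Int) (r : Bool) (hr : r = group_sum5 s nums t) :
    MemoOK nums (memo.insert (s, t) r) := by
  intro s' t' r' h
  rw [PySem.Dict.get?_insert] at h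
  split at h
  · rename_i heq
    obtain ⟨hs, ht⟩ := Prod.mk.injEq .. ▸ heq
    cases h
    subst hs ht
    simpa using hr
  · exact hm s' t' r' h

lemma goB_correct (nums : List Int) : ∀ (n : Nat) (s t : Int) (memo : PySem.Dict (Int × Int) Bool),
    ((nums.length : Int) - s).toNat ≤ n → MemoOK nums memo →
    (goB nums s t memo).1 = group_sum5 s nums t ∧ MemoOK nums (goB nums s t memo).2 := by
  intro n
  induction n with
  | zero =>
      intro s t memo hn hm
      have hs : s ≥ (nums.length : Int) := by omega
      rw [goB, dif_pos hs, group_sum5, dif_pos hs]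
      exact ⟨rfl, hm⟩
  | succ n ih =>
      intro s t memo hn hm
      by_cases hs : s ≥ (nums.length : Int)
      · rw [goB, dif_pos hs, group_sum5, dif_pos hs]
        exact ⟨rfl, hm⟩
      · rw [goB, dif_neg hs]
        cases hhit : memo.get? (s, t) with
        | some r =>
            simp only []
            exact ⟨hm s t r hhit, hm⟩
        | none =>
            simp only []
            cases hv : PySem.List.pyGet? nums s with
            | none =>
                simp only []
                have hA : group_sum5 s nums t = false := by
                  rw [group_sum5, dif_neg hs, hv]
                exact ⟨hA.symm, hm⟩
            | some v =>
                simp only []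
                have hrec : ∀ (t' : Int) (m : PySem.Dict (Int × Int) Bool), MemoOK nums m →
                    (goB nums (s + 1) t' m).1 = group_sum5 (s + 1) nums t' ∧
                    MemoOK nums (goB nums (s + 1) t' m).2 := by
                  intro t' m hm'
                  exact ih (s + 1) t' m (by omega) hm'
                by_cases hlast : (s == (nums.length : Int) - 1 && v == 5) = true
                · rw [if_pos hlast]
                  have hA : group_sum5 s nums t = (t == 5) := by
                    rw [group_sum5, dif_neg hs, hv]
                    simp only []
                    rw [if_pos hlast]
                  exact ⟨hA.symm, memoOK_insert nums memo hm s t _ hA.symm⟩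
                · rw [if_neg hlast]
                  by_cases h5 : (v == 5) = true
                  · rw [if_pos h5]
                    cases hw : PySem.List.pyGet? nums (s + 1) with
                    | none =>
                        simp only []
                        have hA : group_sum5 s nums t = false := by
                          rw [group_sum5, dif_neg hs, hv]
                          simp only []
                          rw [if_neg hlast, if_pos h5, hw]
                        exact ⟨hA.symm, memoOK_insert nums memo hm s t _ hA.symm⟩
                    | some w =>
                        simp only []
                        have hA : group_sum5 s nums t
                            = group_sum5 (s + 1) nums (if (w != 1) = true then t - 5 else t) := by
                          rw [group_sum5, dif_neg hs, hv]
                          simp only []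
                          rw [if_neg hlast, if_pos h5, hw]
                          simp only []
                          by_cases h1 : (w != 1) = true
                          · rw [if_pos h1, if_pos h1]
                          · rw [if_neg h1, if_neg h1]
                        cases hfst : goB nums (s + 1) (if (w != 1) = true then t - 5 else t) memo with
                        | mk r1 m1 =>
                            obtain ⟨hval1, hinv1⟩ := hrec (if (w != 1) = true then t - 5 else t) memo hm
                            rw [hfst] at hval1 hinv1
                            simp only [] at hval1 hinv1
                            have hr1 : r1 = group_sum5 s nums t := by rw [hval1, hA]
                            exact ⟨hr1, memoOK_insert nums m1 hinv1 s t r1 hr1⟩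
                  · rw [if_neg h5]
                    have hA : group_sum5 s nums t
                        = (group_sum5 (s + 1) nums (t - v) || group_sum5 (s + 1) nums t) := by
                      rw [group_sum5, dif_neg hs, hv]
                      simp only []
                      rw [if_neg hlast, if_neg h5]
                    obtain ⟨hval1, hinv1⟩ := hrec (t - v) memo hm
                    cases hfst : goB nums (s + 1) (t - v) memo with
                    | mk r1 m1 =>
                        rw [hfst] at hval1 hinv1
                        simp only [] at hval1 hinv1
                        cases r1 with
                        | true =>
                            have hr : true = group_sum5 s nums t := by
                              rw [hA, ← hval1]; rfl
                            exact ⟨hr, memoOK_insert nums m1 hinv1 s t true hr⟩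
                        | false =>
                            obtain ⟨hval2, hinv2⟩ := hrec t m1 hinv1
                            cases hsnd : goB nums (s + 1) t m1 with
                            | mk r2 m2 =>
                                rw [hsnd] at hval2 hinv2
                                simp only [] at hval2 hinv2
                                simp only [hsnd]
                                have hr : r2 = group_sum5 s nums t := by
                                  rw [hA, ← hval1, ← hval2]
                                  simp
                                exact ⟨hr, memoOK_insert nums m2 hinv2 s t r2 hr⟩

lemma main (start : Int) (nums : List Int) (target : Int) :
    group_sum5 start nums target = group_sum5_alt start nums target := by
  unfold group_sum5_alt
  exact (goB_correct nums ((nums.length : Int) - start).toNat start target PySem.Dict.empty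
    (le_refl _) (memoOK_empty nums)).1.symm

-- ===== VERDICT (by name: the statement is the Claim_ definition above) =====
theorem group_sum5_spec : Claim_equal_group_sum5 := by
  intro start nums target _ _
  unfold Spec_group_sum5
  exact main start nums target
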